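-- pv_equiv track=rewrite | github.com/Abhijit-aptus-123/Task_Manager-Backend | app/services/role_service.py | clean_input_permissions
-- ===== SOURCE A (Python) =====
-- def clean_input_permissions(perms: dict):
--     cleaned = {}
--
--     for module, actions in perms.items():
--
--         # AUDIT → ONLY VIEW
--         if module == "audit":
--             cleaned[module] = {
--                 "view": actions.get("view", False)
--             }
--             continue
--
--         # ANALYTICS → VIEW + VIEW_ALL
--         if module == "analytics":
--             cleaned[module] = {
--                 "view": actions.get("view", False),
--                 "view_all": actions.get("view_all", False)
--             }
--             continue
--
--         # TASK_SCOPE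
--         if module == "task_scope":
--             cleaned[module] = {
--                 "view_all": actions.get("view_all", False),
--                 "create_all": actions.get("create_all", False),
--                 "update_all": actions.get("update_all", False),
--                 "delete_all": actions.get("delete_all", False),
--             }
--             continue
--
--         cleaned[module] = actions
--
--     return cleaned
-- ===== SOURCE B (Python) =====
-- _SPECIAL = (
--     ("audit", ("view",)),
--     ("analytics", ("view", "view_all")),
--     ("task_scope", ("view_all", "create_all", "update_all", "delete_all")),
-- )
--
--
-- def clean_input_permissions(perms: dict):
--     # Stage 1: pass everything through unchanged (values by reference).
--     cleaned = dict(perms)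
--     # Stage 2: patch only the three special modules, driven by the rule list.
--     for module, keys in _SPECIAL:
--         if module in cleaned:
--             actions = cleaned[module]
--             sub = {}
--             for k in keys:
--                 sub[k] = actions.get(k, False)
--             cleaned[module] = sub
--     return cleaned
-- ===== Notes on version B (the rewrite author's own statement) =====
-- stated objective: alternative
-- what changed: B first copies the whole dict through unchanged and then, in a second stage, loops over a static rule list patching (in place) the at most three special modules, instead of A's single pass over perms.items() with an if/continue branch per item.
import Mathlib
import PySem

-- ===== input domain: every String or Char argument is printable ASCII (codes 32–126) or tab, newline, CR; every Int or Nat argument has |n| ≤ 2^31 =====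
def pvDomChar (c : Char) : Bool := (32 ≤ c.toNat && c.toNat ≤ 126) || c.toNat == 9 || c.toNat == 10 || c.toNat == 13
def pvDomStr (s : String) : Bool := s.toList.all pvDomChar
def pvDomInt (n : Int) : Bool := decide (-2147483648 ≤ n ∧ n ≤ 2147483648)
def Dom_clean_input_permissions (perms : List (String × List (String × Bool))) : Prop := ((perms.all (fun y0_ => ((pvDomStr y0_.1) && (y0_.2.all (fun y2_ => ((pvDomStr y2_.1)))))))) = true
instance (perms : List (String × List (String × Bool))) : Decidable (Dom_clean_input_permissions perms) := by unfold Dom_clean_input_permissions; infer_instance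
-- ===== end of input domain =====

-- B replaces A's single pass with per-item branch chain by a copy-through plus a second stage that patches the three special modules from a static rule list (objective: alternative, same cost).


-- ===== PORT A =====
-- actions.get(k, False) on the inner dict (assoc list, first match wins)
def pvGetA (actions : List (String × Bool)) (k : String) : Bool :=
  PySem.Dict.getD (PySem.Dict.mk actions) k false

-- literal port of A's loop: one branch per special module, `continue` = move to the
-- rest of the items; `cleaned[module] = ...` appends in iteration order.
def clean_input_permissions (perms : List (String × List (String × Bool))) : List (String × List (String × Bool)) :=
  match perms with
  | [] => []
  | (module, actions) :: rest =>
    if module == "audit" then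
      (module, [("view", pvGetA actions "view")]) :: clean_input_permissions rest
    else if module == "analytics" then
      (module, [("view", pvGetA actions "view"),
                ("view_all", pvGetA actions "view_all")]) :: clean_input_permissions rest
    else if module == "task_scope" then
      (module, [("view_all", pvGetA actions "view_all"),
                ("create_all", pvGetA actions "create_all"),
                ("update_all", pvGetA actions "update_all"),
                ("delete_all", pvGetA actions "delete_all")]) :: clean_input_permissions rest
    else
      (module, actions) :: clean_input_permissions rest

-- ===== PORT B =====
-- the static _SPECIAL rule list: module -> allowed action keys
def pvSpecial : List (String × List String) :=
  [("audit", ["view"]),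
   ("analytics", ["view", "view_all"]),
   ("task_scope", ["view_all", "create_all", "update_all", "delete_all"])]

-- stage-2 patch step: under the assoc-list dict encoding, "if module in cleaned:
-- cleaned[module] = {k: actions.get(k, False) for k in keys}" overwrites the value
-- in place at the key's position (exact for Python dicts, whose keys are unique)
def pvFix (cleaned : List (String × List (String × Bool))) (m : String) (ks : List String) : List (String × List (String × Bool)) :=
  cleaned.map (fun p => if p.1 == m then (p.1, ks.map (fun k => (k, pvGetA p.2 k))) else p)

-- stage 1 is the identity copy `dict(perms)`; stage 2 folds the rule list over it
def clean_input_permissions_alt (perms : List (String × List (String × Bool))) : List (String × List (String × Bool)) :=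
  pvSpecial.foldl (fun cleaned r => pvFix cleaned r.1 r.2) perms

-- ===== PRECONDITION & SPEC =====
def Spec_clean_input_permissions (perms : List (String × List (String × Bool))) (out : List (String × List (String × Bool))) : Prop := out = clean_input_permissions_alt perms
instance (perms : List (String × List (String × Bool))) (out : List (String × List (String × Bool))) : Decidable (Spec_clean_input_permissions perms out) := by unfold Spec_clean_input_permissions; infer_instance

-- ===== CLAIM (what is proved, stated in full; the proofs are below) =====
def Claim_equal_clean_input_permissions : Prop := ∀ (perms : List (String × List (String × Bool))), Dom_clean_input_permissions perms → Spec_clean_input_permissions perms (clean_input_permissions perms)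

-- ===== LEMMAS AND PROOFS =====
-- B unfolded: three elementwise patches composed over the input list
theorem alt_eq_map (perms : List (String × List (String × Bool))) :
    clean_input_permissions_alt perms =
      pvFix (pvFix (pvFix perms "audit" ["view"]) "analytics" ["view", "view_all"])
        "task_scope" ["view_all", "create_all", "update_all", "delete_all"] := by
  rfl

theorem clean_eq (perms : List (String × List (String × Bool))) :
    clean_input_permissions perms = clean_input_permissions_alt perms := by
  induction perms with
  | nil => rfl
  | cons p rest ih =>
    obtain ⟨module, actions⟩ := p
    rw [alt_eq_map] at ih ⊢
    by_cases h1 : module = "audit"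
    · subst h1
      simp [clean_input_permissions, pvFix, List.map] at ih ⊢
      exact ih
    · by_cases h2 : module = "analytics"
      · subst h2
        simp [clean_input_permissions, pvFix, List.map] at ih ⊢
        exact ih
      · by_cases h3 : module = "task_scope"
        · subst h3
          simp [clean_input_permissions, pvFix, List.map] at ih ⊢
          exact ih
        · simp [clean_input_permissions, pvFix, List.map, h1, h2, h3] at ih ⊢
          exact ih

-- ===== VERDICT (by name: the statement is the Claim_ definition above) =====
theorem clean_input_permissions_spec : Claim_equal_clean_input_permissions := by
  intro perms _
  unfold Spec_clean_input_permissions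
  exact clean_eq perms
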